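-- pv_equiv track=rewrite | github.com/benayascode/A2SV | 06-Feb-2025/Apply Operations to an Array 246408.py | applyOperations
-- ===== SOURCE A (Python) =====
-- from typing import List
--
-- def applyOperations(nums: List[int]) -> List[int]:
--     i=0
--     while i < len(nums)-1:
--         if nums[i]==nums[i+1]:
--             nums[i]=nums[i]*2
--             nums[i+1]=0
--             i+=2
--         else:
--             i+=1
--     x=nums.count(0)
--     nums=[i for i in nums if i != 0]
--     nums = nums + [0] * x
--     return nums
-- ===== SOURCE B (Python) =====
-- def applyOperations(nums):
--     # Single pass: merge adjacent equal pairs and collect nonzeros directly,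
--     # padding with zeros at the end. Does NOT mutate nums (A does).
--     out = []
--     n = len(nums)
--     i = 0
--     while i < n:
--         if i + 1 < n and nums[i] == nums[i + 1]:
--             v = nums[i] * 2
--             if v != 0:
--                 out.append(v)
--             i += 2
--         else:
--             if nums[i] != 0:
--                 out.append(nums[i])
--             i += 1
--     return out + [0] * (n - len(out))
-- ===== Notes on version B (the rewrite author's own statement) =====
-- stated objective: alternative
-- what changed: B replaces A's three passes (in-place merge loop, zero count, filter then concatenate) by a single index pass that merges pairs and emits nonzeros directly, padding zeros from the length difference; B does not mutate the argument list.
import Mathlib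
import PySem

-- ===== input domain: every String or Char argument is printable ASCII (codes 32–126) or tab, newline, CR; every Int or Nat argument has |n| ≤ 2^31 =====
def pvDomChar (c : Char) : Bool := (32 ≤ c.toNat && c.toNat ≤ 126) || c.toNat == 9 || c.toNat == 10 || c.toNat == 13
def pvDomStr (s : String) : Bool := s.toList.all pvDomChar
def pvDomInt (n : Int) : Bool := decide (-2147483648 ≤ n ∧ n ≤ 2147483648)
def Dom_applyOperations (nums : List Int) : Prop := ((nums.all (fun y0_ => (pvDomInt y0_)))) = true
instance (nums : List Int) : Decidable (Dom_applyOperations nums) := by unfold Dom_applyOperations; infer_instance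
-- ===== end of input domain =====

-- B does the merge, the zero-filter and the padding in one index pass instead of A's
-- three passes; equivalence is about the RETURN value only (A mutates its argument, B does not).

-- ===== PORT A =====
-- the in-place while loop: i steps by 2 after a merge, sets nums[i] := nums[i]*2, nums[i+1] := 0
def mergeA (nums : List Int) (i : Nat) : List Int :=
  if i + 1 < nums.length then
    if nums.getD i 0 = nums.getD (i + 1) 0 then
      mergeA ((nums.set i (nums.getD i 0 * 2)).set (i + 1) 0) (i + 2)
    else
      mergeA nums (i + 1)
  else nums
termination_by nums.length - i
decreasing_by all_goals simp_all; omega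

def applyOperations (nums : List Int) : List Int :=
  let nums1 := mergeA nums 0
  let x := nums1.count 0
  let nums2 := nums1.filter (fun v => v != 0)
  nums2 ++ List.replicate x 0

-- ===== PORT B =====
-- single pass: emit the merged nonzeros directly
def loopB (nums : List Int) (i : Nat) : List Int :=
  if i < nums.length then
    if i + 1 < nums.length ∧ nums.getD i 0 = nums.getD (i + 1) 0 then
      let v := nums.getD i 0 * 2
      (if v ≠ 0 then [v] else []) ++ loopB nums (i + 2)
    else
      (if nums.getD i 0 ≠ 0 then [nums.getD i 0] else []) ++ loopB nums (i + 1)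
  else []
termination_by nums.length - i
decreasing_by all_goals omega

def applyOperations_alt (nums : List Int) : List Int :=
  let out := loopB nums 0
  out ++ List.replicate (nums.length - out.length) 0

-- ===== PRECONDITION & SPEC =====
def Spec_applyOperations (nums : List Int) (out : List Int) : Prop := out = applyOperations_alt nums
instance (nums : List Int) (out : List Int) : Decidable (Spec_applyOperations nums out) := by unfold Spec_applyOperations; infer_instance

-- ===== CLAIM (what is proved, stated in full; the proofs are below) =====
def Claim_equal_applyOperations : Prop := ∀ (nums : List Int), Dom_applyOperations nums → Spec_applyOperations nums (applyOperations nums)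

-- ===== LEMMAS AND PROOFS =====

-- pure functional characterisation of the merge phase
def mergeL : List Int → List Int
  | [] => []
  | [a] => [a]
  | a :: b :: rest => if a = b then a * 2 :: 0 :: mergeL rest else a :: mergeL (b :: rest)

theorem mergeL_length : ∀ l : List Int, (mergeL l).length = l.length := by
  intro l
  induction l using mergeL.induct with
  | case1 => simp [mergeL]
  | case2 => simp [mergeL]
  | case3 b rest ih => simp [mergeL, ih]
  | case4 a b rest h ih => simp [mergeL, h]; simpa [mergeL] using ih

theorem getD_append_len (pre : List Int) (suf : List Int) (k : Nat) :
    (pre ++ suf).getD (pre.length + k) 0 = suf.getD k 0 := by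
  simp [List.getD, List.getElem?_append_right]

theorem mergeA_eq : ∀ (suf pre : List Int),
    mergeA (pre ++ suf) pre.length = pre ++ mergeL suf := by
  intro suf
  induction suf using mergeL.induct with
  | case1 => intro pre; rw [mergeA]; simp [mergeL]
  | case2 a =>
      intro pre; rw [mergeA]; simp [mergeL]
  | case3 b rest ih =>
      intro pre
      rw [mergeA]
      have h1 : pre.length + 1 < (pre ++ b :: b :: rest).length := by simp only [List.length_append, List.length_cons, List.length_nil]; omega
      have g0 : (pre ++ b :: b :: rest).getD pre.length 0 = b := by
        simpa using getD_append_len pre (b :: b :: rest) 0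
      have g1 : (pre ++ b :: b :: rest).getD (pre.length + 1) 0 = b := by
        simpa using getD_append_len pre (b :: b :: rest) 1
      rw [if_pos h1, g0, g1, if_pos rfl]
      have hset : ((pre ++ b :: b :: rest).set pre.length (b * 2)).set (pre.length + 1) 0
          = (pre ++ [b * 2, 0]) ++ rest := by
        rw [List.set_append_right _ _ (by omega), List.set_append_right _ _ (by omega)]
        simp
      rw [hset]
      have hlen : pre.length + 2 = (pre ++ [b * 2, 0]).length := by simp only [List.length_append, List.length_cons, List.length_nil]
      rw [hlen, ih (pre ++ [b * 2, 0])]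
      simp [mergeL]
  | case4 a b rest h ih =>
      intro pre
      rw [mergeA]
      have h1 : pre.length + 1 < (pre ++ a :: b :: rest).length := by simp only [List.length_append, List.length_cons, List.length_nil]; omega
      have g0 : (pre ++ a :: b :: rest).getD pre.length 0 = a := by
        simpa using getD_append_len pre (a :: b :: rest) 0
      have g1 : (pre ++ a :: b :: rest).getD (pre.length + 1) 0 = b := by
        simpa using getD_append_len pre (a :: b :: rest) 1
      rw [if_pos h1, g0, g1, if_neg h]
      have hre : pre ++ a :: b :: rest = (pre ++ [a]) ++ b :: rest := by simp
      have hlen : pre.length + 1 = (pre ++ [a]).length := by simp only [List.length_append, List.length_cons, List.length_nil]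
      rw [hre, hlen, ih (pre ++ [a])]
      simp [mergeL, h]

theorem loopB_eq : ∀ (suf pre : List Int),
    loopB (pre ++ suf) pre.length = (mergeL suf).filter (fun v => v != 0) := by
  intro suf
  induction suf using mergeL.induct with
  | case1 => intro pre; rw [loopB]; simp [mergeL]
  | case2 a =>
      intro pre
      rw [loopB]
      have h0 : pre.length < (pre ++ [a]).length := by simp only [List.length_append, List.length_cons, List.length_nil]; omega
      have g0 : (pre ++ [a]).getD pre.length 0 = a := by
        simpa using getD_append_len pre [a] 0
      have hc : ¬ (pre.length + 1 < (pre ++ [a]).length ∧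
          (pre ++ [a]).getD pre.length 0 = (pre ++ [a]).getD (pre.length + 1) 0) := by
        simp
      rw [if_pos h0, if_neg hc, g0]
      rw [loopB]
      simp [mergeL]
      by_cases ha : a = 0 <;> simp [ha]
  | case3 b rest ih =>
      intro pre
      rw [loopB]
      have h0 : pre.length < (pre ++ b :: b :: rest).length := by simp only [List.length_append, List.length_cons, List.length_nil]; omega
      have g0 : (pre ++ b :: b :: rest).getD pre.length 0 = b := by
        simpa using getD_append_len pre (b :: b :: rest) 0
      have g1 : (pre ++ b :: b :: rest).getD (pre.length + 1) 0 = b := by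
        simpa using getD_append_len pre (b :: b :: rest) 1
      have hc : pre.length + 1 < (pre ++ b :: b :: rest).length ∧
          (pre ++ b :: b :: rest).getD pre.length 0 = (pre ++ b :: b :: rest).getD (pre.length + 1) 0 := by
        exact ⟨by simp only [List.length_append, List.length_cons, List.length_nil]; omega, by rw [g0, g1]⟩
      rw [if_pos h0, if_pos hc, g0]
      have hre : pre ++ b :: b :: rest = (pre ++ [b, b]) ++ rest := by simp
      have hlen : pre.length + 2 = (pre ++ [b, b]).length := by simp only [List.length_append, List.length_cons, List.length_nil]
      rw [hre, hlen, ih (pre ++ [b, b])]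
      by_cases hv : b * 2 = 0 <;> simp [mergeL, List.filter_cons, hv]
  | case4 a b rest h ih =>
      intro pre
      rw [loopB]
      have h0 : pre.length < (pre ++ a :: b :: rest).length := by simp only [List.length_append, List.length_cons, List.length_nil]; omega
      have g0 : (pre ++ a :: b :: rest).getD pre.length 0 = a := by
        simpa using getD_append_len pre (a :: b :: rest) 0
      have g1 : (pre ++ a :: b :: rest).getD (pre.length + 1) 0 = b := by
        simpa using getD_append_len pre (a :: b :: rest) 1
      have hc : ¬ (pre.length + 1 < (pre ++ a :: b :: rest).length ∧
          (pre ++ a :: b :: rest).getD pre.length 0 = (pre ++ a :: b :: rest).getD (pre.length + 1) 0) := by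
        rw [g0, g1]; exact fun hh => h hh.2
      rw [if_pos h0, if_neg hc, g0]
      have hre : pre ++ a :: b :: rest = (pre ++ [a]) ++ b :: rest := by simp
      have hlen : pre.length + 1 = (pre ++ [a]).length := by simp only [List.length_append, List.length_cons, List.length_nil]
      rw [hre, hlen, ih (pre ++ [a])]
      simp [mergeL, h, List.filter_cons]
      by_cases ha : a = 0 <;> simp [ha]

theorem count_add_filter_len (m : List Int) :
    m.count 0 + (m.filter (fun v => v != 0)).length = m.length := by
  induction m with
  | nil => simp
  | cons a l ih =>
      by_cases ha : a = 0 <;>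
        simp [List.count_cons, List.filter_cons, ha] <;> omega

-- ===== VERDICT (by name: the statement is the Claim_ definition above) =====
theorem applyOperations_spec : Claim_equal_applyOperations := by
  intro nums _
  unfold Spec_applyOperations applyOperations applyOperations_alt
  have hA : mergeA nums 0 = mergeL nums := by
    simpa using mergeA_eq nums []
  have hB : loopB nums 0 = (mergeL nums).filter (fun v => v != 0) := by
    simpa using loopB_eq nums []
  rw [hA, hB]
  have hc := count_add_filter_len (mergeL nums)
  have hl := mergeL_length nums
  have : (mergeL nums).count 0 =
      nums.length - ((mergeL nums).filter (fun v => v != 0)).length := by omega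
  simp only [this]
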